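-- pv_equiv track=rewrite | github.com/SCU-SCST-SAST-MR/Learning-Materials | Python程序设计/2018-1.py | func6
-- ===== SOURCE A (Python) =====
-- def func6(m,n):
--     if m <= 0 or n <= 0:
--         return None
--     elif m < 100:
--         return m
--     lst = []
--     while m:
--         lst.append(m % 10)
--         m //= 10
--     lst.reverse()
--     lst[0] += n
--     if lst[0] >= 10:
--         lst[0] %= 10
--     a = 0
--     num = 0
--     for x in lst:
--         n = len(lst) - 1 - num
--         num += 1
--         a += x * 10**n
--     return a
-- ===== SOURCE B (Python) =====
-- def func6(m, n):
--     if m <= 0 or n <= 0: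
--         return None
--     if m < 100:
--         return m
--     p = 1
--     while m // p >= 10:
--         p *= 10
--     d = m // p
--     return m + ((d + n) % 10 - d) * p
-- ===== Notes on version B (the rewrite author's own statement) =====
-- stated objective: simpler
-- what changed: B replaces A's digit-list extraction loop plus positional power-of-ten reconstruction loop with direct arithmetic: one loop finds p, the highest power of ten in m, and the leading digit is replaced in place via m + ((m//p + n) % 10 - m//p) * p.
import Mathlib
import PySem

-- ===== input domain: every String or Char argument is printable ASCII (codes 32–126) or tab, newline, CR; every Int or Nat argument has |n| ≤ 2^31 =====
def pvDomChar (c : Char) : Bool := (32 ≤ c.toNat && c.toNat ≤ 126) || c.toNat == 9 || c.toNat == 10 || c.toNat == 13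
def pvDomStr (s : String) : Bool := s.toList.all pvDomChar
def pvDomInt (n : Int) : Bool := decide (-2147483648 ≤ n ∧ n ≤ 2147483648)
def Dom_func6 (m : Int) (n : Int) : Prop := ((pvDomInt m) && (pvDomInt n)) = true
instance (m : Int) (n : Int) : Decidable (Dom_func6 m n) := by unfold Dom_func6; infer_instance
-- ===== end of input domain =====

-- B replaces A's digit-list extraction and power-of-ten reconstruction loops with in-place
-- leading-digit arithmetic on one power of ten (objective: simpler).


-- ===== PORT A =====
-- `while m: lst.append(m % 10); m //= 10` — the loop is only reached with m ≥ 100, where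
-- Python's truthiness test `while m` is `while 0 < m`; that guard makes the recursion well-founded.
def func6_digits (m : Int) (acc : List Int) : List Int :=
  if _h : 0 < m then
    func6_digits (PySem.Int.floordiv m 10) (acc ++ [PySem.Int.mod m 10])
  else acc
termination_by m.toNat
decreasing_by
  rw [PySem.Int.floordiv_eq_ediv_of_pos (by norm_num)]
  omega

def func6 (m : Int) (n : Int) : Option Int :=
  if m ≤ 0 ∨ n ≤ 0 then none
  else if m < 100 then some m
  else
    let lst := func6_digits m []
    let lst := lst.reverse
    -- lst[0] += n; if lst[0] >= 10: lst[0] %= 10  (lst is nonempty here since m ≥ 100;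
    -- the [] branch is unreachable — Python would raise IndexError there)
    let lst := match lst with
      | [] => []
      | x :: rest => (if 10 ≤ x + n then PySem.Int.mod (x + n) 10 else x + n) :: rest
    -- 10 ** (len(lst) - 1 - num): the exponent is ≥ 0 on every iteration, so Nat power is exact
    some ((lst.foldl (fun (st : Int × Int) (x : Int) =>
        (st.1 + x * 10 ^ ((lst.length : Int) - 1 - st.2).toNat, st.2 + 1)) (0, 0)).1)

-- ===== PORT B =====
-- `while m // p >= 10: p *= 10` — fuel m.toNat strictly exceeds the number of iterations on
-- every input that reaches the loop (m ≥ 100), so this fuel recursion is exact there.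
def func6_powLoop (m : Int) (p : Int) : Nat → Int
  | 0 => p
  | fuel + 1 => if 10 ≤ PySem.Int.floordiv m p then func6_powLoop m (p * 10) fuel else p

def func6_alt (m : Int) (n : Int) : Option Int :=
  if m ≤ 0 ∨ n ≤ 0 then none
  else if m < 100 then some m
  else
    let p := func6_powLoop m 1 m.toNat
    let d := PySem.Int.floordiv m p
    some (m + (PySem.Int.mod (d + n) 10 - d) * p)

-- ===== PRECONDITION & SPEC =====
def Spec_func6 (m : Int) (n : Int) (out : Option Int) : Prop := out = func6_alt m n
instance (m : Int) (n : Int) (out : Option Int) : Decidable (Spec_func6 m n out) := by unfold Spec_func6; infer_instance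

-- ===== CLAIM (what is proved, stated in full; the proofs are below) =====
def Claim_equal_func6 : Prop := ∀ (m : Int) (n : Int), Dom_func6 m n → Spec_func6 m n (func6 m n)

-- ===== LEMMAS AND PROOFS =====

-- value of a most-significant-digit-first list
def pvValMSB : List Int → Int
  | [] => 0
  | x :: xs => x * 10 ^ xs.length + pvValMSB xs

theorem pvValMSB_append (l : List Int) (x : Int) :
    pvValMSB (l ++ [x]) = 10 * pvValMSB l + x := by
  induction l with
  | nil => simp [pvValMSB]
  | cons y ys ih => simp [pvValMSB, ih]; ring

theorem func6_digits_append (m : Int) (acc : List Int) :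
    func6_digits m acc = acc ++ func6_digits m [] := by
  induction hk : m.toNat using Nat.strong_induction_on generalizing m acc with
  | _ k ih =>
    rw [func6_digits]
    conv_rhs => rw [func6_digits]
    by_cases h : 0 < m
    · simp only [dif_pos h]
      have hlt : (PySem.Int.floordiv m 10).toNat < k := by
        rw [PySem.Int.floordiv_eq_ediv_of_pos (by norm_num)]; omega
      rw [ih _ hlt _ _ rfl, ih _ hlt _ ([] ++ [PySem.Int.mod m 10]) rfl]
      simp
    · simp [h]

theorem func6_digits_eq (M : Nat) (h : 0 < M) :
    func6_digits (M : Int) [] = (Nat.digits 10 M).map Int.ofNat := by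
  induction M using Nat.strong_induction_on with
  | _ M ih =>
    rw [func6_digits, dif_pos (by exact_mod_cast h)]
    have h10 : PySem.Int.floordiv (M : Int) 10 = ((M / 10 : Nat) : Int) := by
      rw [PySem.Int.floordiv_eq_ediv_of_pos (by norm_num)]
      omega
    have hmod : PySem.Int.mod (M : Int) 10 = ((M % 10 : Nat) : Int) := by
      rw [PySem.Int.mod_eq_emod_of_pos (by norm_num)]
      omega
    rw [h10, hmod, func6_digits_append, Nat.digits_def' (by norm_num : 1 < 10) h]
    by_cases h2 : 0 < M / 10
    · rw [ih _ (Nat.div_lt_self h (by norm_num)) h2]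
      simp
    · have : M / 10 = 0 := by omega
      rw [this]
      rw [func6_digits]
      simp

theorem digits_getLast_eq (M : Nat) (h : 0 < M) (hne : Nat.digits 10 M ≠ []) :
    (Nat.digits 10 M).getLast hne = M / 10 ^ ((Nat.digits 10 M).length - 1) := by
  induction M using Nat.strong_induction_on with
  | _ M ih =>
    by_cases hs : M < 10
    · have hd : Nat.digits 10 M = [M] := Nat.digits_of_lt 10 M (by omega) hs
      simp [hd]
    · have h2 : 0 < M / 10 := Nat.div_pos (by omega) (by norm_num)
      have hd : Nat.digits 10 M = M % 10 :: Nat.digits 10 (M / 10) :=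
        Nat.digits_def' (by norm_num) h
      have hne2 : Nat.digits 10 (M / 10) ≠ [] := Nat.digits_ne_nil_iff_ne_zero.mpr (by omega)
      have hlen2 : 1 ≤ (Nat.digits 10 (M / 10)).length := List.length_pos_iff.mpr hne2
      have := ih (M / 10) (Nat.div_lt_self h (by norm_num)) h2 hne2
      rw [List.getLast_congr _ (by simp) hd, List.getLast_cons hne2, this]
      rw [Nat.div_div_eq_div_mul, hd]
      simp only [List.length_cons]
      congr 1
      rw [← pow_succ']
      congr 1
      omega

theorem pvValMSB_reverse_map (l : List Nat) :
    pvValMSB ((l.map Int.ofNat).reverse) = ((Nat.ofDigits 10 l : Nat) : Int) := by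
  induction l with
  | nil => simp [pvValMSB, Nat.ofDigits]
  | cons x xs ih =>
    simp only [List.map_cons, List.reverse_cons]
    rw [pvValMSB_append, ih]
    push_cast [Nat.ofDigits_cons, Int.ofNat_eq_natCast]
    ring

theorem func6_fold (Ltot : Int) (s : List Int) (a num : Int) (h : num = Ltot - s.length) :
    (s.foldl (fun (st : Int × Int) (x : Int) =>
        (st.1 + x * 10 ^ (Ltot - 1 - st.2).toNat, st.2 + 1)) (a, num)).1
      = a + pvValMSB s := by
  induction s generalizing a num with
  | nil => simp [pvValMSB]
  | cons x xs ih =>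
    simp only [List.foldl_cons]
    rw [ih _ _ (by simp at h ⊢; omega)]
    have hexp : (Ltot - 1 - num).toNat = xs.length := by
      simp only [List.length_cons] at h; omega
    rw [hexp]
    simp [pvValMSB]
    ring

theorem func6_powLoop_spec (fuel : Nat) (m p : Int) (hp : 0 < p) (hpm : p ≤ m)
    (hfuel : m < p * 10 ^ fuel) :
    ∃ j : Nat, func6_powLoop m p fuel = p * 10 ^ j ∧ p * 10 ^ j ≤ m ∧ m < p * 10 ^ j * 10 := by
  induction fuel generalizing p with
  | zero =>
    simp at hfuel
    omega
  | succ fuel ih =>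
    rw [func6_powLoop]
    have hdiv : PySem.Int.floordiv m p = m / p :=
      PySem.Int.floordiv_eq_ediv_of_pos hp
    by_cases hc : 10 ≤ PySem.Int.floordiv m p
    · rw [if_pos hc]
      have h10 : 10 * p ≤ m := by
        rw [hdiv] at hc
        calc 10 * p = 10 * p := rfl
        _ ≤ (m / p) * p := by nlinarith
        _ ≤ m := Int.ediv_mul_le m (by omega)
      obtain ⟨j, hj, hj1, hj2⟩ := ih (p * 10) (by positivity) (by omega)
        (by rw [pow_succ] at hfuel; nlinarith)
      refine ⟨j + 1, ?_, ?_, ?_⟩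
      · rw [hj]; ring
      · rw [pow_succ]; nlinarith
      · rw [pow_succ]; nlinarith
    · rw [if_neg hc]
      refine ⟨0, by ring, by simpa using hpm, ?_⟩
      rw [hdiv] at hc
      push Not at hc
      have := Int.emod_add_mul_ediv m p
      have hlt : m % p < p := Int.emod_lt_of_pos m hp
      have hnn : 0 ≤ m % p := Int.emod_nonneg m (by omega)
      nlinarith

theorem pow_unique (j L' M : Nat)
    (h1 : 10 ^ j ≤ M) (h2 : M < 10 ^ (j + 1))
    (h3 : 10 ^ L' ≤ M) (h4 : M < 10 ^ (L' + 1)) : j = L' := by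
  rcases lt_trichotomy j L' with h | h | h
  · have : 10 ^ (j + 1) ≤ 10 ^ L' := Nat.pow_le_pow_right (by norm_num) (by omega)
    omega
  · exact h
  · have : 10 ^ (L' + 1) ≤ 10 ^ j := Nat.pow_le_pow_right (by norm_num) (by omega)
    omega

-- ===== VERDICT (by name: the statement is the Claim_ definition above) =====
theorem func6_spec : Claim_equal_func6 := by
  intro m n _hdom
  unfold Spec_func6 func6 func6_alt
  by_cases hg : m ≤ 0 ∨ n ≤ 0
  · simp [hg]
  · by_cases hs : m < 100
    · simp [hg, hs]
    · simp only [if_neg hg, if_neg hs]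
      push Not at hg hs
      obtain ⟨hm, hn⟩ := hg
      -- names for the number and its digit list
      set M := m.toNat with hMdef
      have hmM : (M : Int) = m := Int.toNat_of_nonneg (by omega)
      have hM100 : 100 ≤ M := by omega
      set D := Nat.digits 10 M with hD
      have hDne : D ≠ [] := Nat.digits_ne_nil_iff_ne_zero.mpr (by omega)
      have hDmne : D.map Int.ofNat ≠ [] := by simpa using hDne
      have hlst : func6_digits m [] = D.map Int.ofNat := by
        rw [← hmM]; exact func6_digits_eq M (by omega)
      -- shape of the reversed digit list
      obtain ⟨r0, rest, hrev⟩ : ∃ r0 rest, (D.map Int.ofNat).reverse = r0 :: rest :=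
        List.exists_cons_of_ne_nil (by simpa using hDmne)
      have hr0g : r0 = Int.ofNat (D.getLast hDne) := by
        have h1 : (D.map Int.ofNat).reverse.head? = some r0 := by rw [hrev]; rfl
        have h2 : (D.map Int.ofNat).reverse.head? = some (Int.ofNat (D.getLast hDne)) := by
          rw [List.head?_reverse, List.getLast?_map,
            List.getLast?_eq_some_getLast hDne]
          rfl
        rw [h1] at h2
        exact Option.some.inj h2
      have hlenrev : rest.length + 1 = D.length := by
        have := congrArg List.length hrev
        simpa using this.symm
      -- the leading digit as a quotient
      have hr0 : r0 = Int.ofNat (M / 10 ^ rest.length) := by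
        rw [hr0g, digits_getLast_eq M (by omega) hDne, ← hD,
          show D.length - 1 = rest.length by omega]
      -- value of the digit list
      have hval : pvValMSB (r0 :: rest) = (M : Int) := by
        have h1 := pvValMSB_reverse_map D
        have h2 : Nat.ofDigits 10 D = M := by rw [hD]; exact Nat.ofDigits_digits 10 M
        rw [hrev, h2] at h1
        exact h1
      -- digit-count bounds on M
      have hub : M < 10 ^ D.length := Nat.lt_base_pow_length_digits (by norm_num)
      have hlb : 10 ^ rest.length ≤ M := by
        have h2 : 10 ^ D.length ≤ 10 * M :=
          Nat.base_pow_length_digits_le 10 M (by norm_num) (by omega)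
        have h3 : 10 ^ D.length = 10 * 10 ^ rest.length := by
          rw [← hlenrev, pow_succ]; ring
        omega
      -- the power loop of B finds exactly 10 ^ rest.length
      obtain ⟨j, hpj, hb1, hb2⟩ := func6_powLoop_spec M m 1 (by norm_num) (by omega)
        (by
          have : (M : Int) < (10 : Int) ^ M := by
            exact_mod_cast Nat.lt_pow_self (by norm_num)
          omega)
      rw [one_mul] at hpj hb1 hb2
      have hjL : j = rest.length := by
        rw [← hmM] at hb1 hb2
        refine pow_unique j rest.length M ?_ ?_ hlb ?_
        · exact_mod_cast hb1
        · have : (M : Int) < (10 : Int) ^ (j + 1) := by rw [pow_succ]; omega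
          exact_mod_cast this
        · have h3 : 10 ^ (rest.length + 1) = 10 ^ D.length := by rw [hlenrev]
          omega
      rw [hjL] at hpj
      -- B's d equals the leading digit
      have hdval : PySem.Int.floordiv m ((10 : Int) ^ rest.length) = r0 := by
        rw [PySem.Int.floordiv_eq_ediv_of_pos (by positivity), hr0, ← hmM]
        norm_num [Int.natCast_div]
      -- both sides, assembled
      rw [hlst, hrev, hpj, hdval]
      have hfold := func6_fold
        ((((if 10 ≤ r0 + n then PySem.Int.mod (r0 + n) 10 else r0 + n) :: rest).length : Int))
        ((if 10 ≤ r0 + n then PySem.Int.mod (r0 + n) 10 else r0 + n) :: rest) 0 0 (by simp)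
      rw [hfold]
      -- the conditional %= equals an unconditional Python mod
      have hr0nn : 0 ≤ r0 := by rw [hr0g]; exact Int.natCast_nonneg _
      have hmodeq : (if 10 ≤ r0 + n then PySem.Int.mod (r0 + n) 10 else r0 + n)
          = PySem.Int.mod (r0 + n) 10 := by
        split_ifs with hc
        · rfl
        · rw [PySem.Int.mod_eq_emod_of_pos (by norm_num)]
          rw [Int.emod_eq_of_lt (by omega) (by omega)]
      rw [hmodeq]
      simp only [pvValMSB]
      have hrest : pvValMSB rest = (M : Int) - r0 * 10 ^ rest.length := by
        have := hval
        simp only [pvValMSB] at this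
        omega
      rw [hrest, hmM]
      ring_nf
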